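-- pv_equiv track=rewrite | github.com/PabloBondia/sa-bwt-exact-matching-Prefix-Doubling-SA-and-BWT-Search-in-Python.- | src/bwt.py | build_c_table
-- ===== SOURCE A (Python) =====
-- def build_c_table(bwt):
--     """
--     Build the C-table for FM-index.
--
--     C[c] = number of characters in BWT that are lexicographically smaller than c.
--     Time complexity: O(n + σ) where σ is alphabet size.
--
--     Args:
--         bwt (str): The BWT string.
--
--     Returns:
--         dict: C-table mapping each character to its count.
--     """
--     # Count occurrences of each character
--     counts = {}
--     for c in bwt:
--         counts[c] = counts.get(c, 0) + 1
--
--     # Build C-table: cumulative counts in lexicographic order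
--     c_table = {}
--     total = 0
--     for c in sorted(counts.keys()):
--         c_table[c] = total
--         total += counts[c]
--
--     return c_table
-- ===== SOURCE B (Python) =====
-- def build_c_table(bwt):
--     """C[c] = number of characters in bwt smaller than c, as a dict in sorted key order."""
--     c_table = {}
--     for i, c in enumerate(sorted(bwt)):
--         if c not in c_table:
--             c_table[c] = i
--     return c_table
-- ===== Notes on version B (the rewrite author's own statement) =====
-- stated objective: simpler
-- what changed: Instead of counting occurrences in a dict and then accumulating cumulative sums over the sorted distinct keys, B sorts the whole string once and records, for each character, the index of its first occurrence in the sorted stream (which equals the number of smaller characters).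
import Mathlib
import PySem

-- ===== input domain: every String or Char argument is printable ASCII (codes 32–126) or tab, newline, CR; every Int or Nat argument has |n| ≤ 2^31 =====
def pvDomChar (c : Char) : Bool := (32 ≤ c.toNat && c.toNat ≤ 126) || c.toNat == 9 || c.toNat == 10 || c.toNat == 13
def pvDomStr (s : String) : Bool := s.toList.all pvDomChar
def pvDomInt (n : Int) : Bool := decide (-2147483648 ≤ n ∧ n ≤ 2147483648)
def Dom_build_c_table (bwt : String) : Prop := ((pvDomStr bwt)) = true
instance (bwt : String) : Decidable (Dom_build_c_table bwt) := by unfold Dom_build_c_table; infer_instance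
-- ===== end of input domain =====

-- B replaces A's count-then-cumulate pair of dict loops by one pass over the fully
-- sorted character stream, recording each character's first index there (objective: simpler).
-- Python dict keys are one-character strings; both ports keep Char keys internally and
-- wrap them into one-character Strings on return (exact: single-char str order = Char order).

-- ===== PORT A =====
def build_c_table (bwt : String) : List (String × Int) :=
  -- counts[c] = counts.get(c, 0) + 1
  let counts := bwt.toList.foldl (fun d c => d.insert c (d.getD c 0 + 1)) PySem.Dict.empty
  -- for c in sorted(counts.keys()): c_table[c] = total; total += counts[c]
  -- (counts[c] always present here; getD is exact)
  let st := (PySem.List.sorted counts.keys (fun c => c) false).foldl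
      (fun (st : PySem.Dict Char Int × Int) c => (st.1.insert c st.2, st.2 + counts.getD c 0))
      (PySem.Dict.empty, 0)
  st.1.items.map (fun p => (String.ofList [p.1], p.2))

-- ===== PORT B =====
def build_c_table_alt (bwt : String) : List (String × Int) :=
  -- for i, c in enumerate(sorted(bwt)): if c not in c_table: c_table[c] = i
  let d := (PySem.List.enumerate (PySem.List.sorted bwt.toList (fun c => c) false) 0).foldl
      (fun (d : PySem.Dict Char Int) p => if d.contains p.2 then d else d.insert p.2 p.1)
      PySem.Dict.empty
  d.items.map (fun p => (String.ofList [p.1], p.2))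

-- ===== PRECONDITION & SPEC =====
def Spec_build_c_table (bwt : String) (out : List (String × Int)) : Prop := out = build_c_table_alt bwt
instance (bwt : String) (out : List (String × Int)) : Decidable (Spec_build_c_table bwt out) := by unfold Spec_build_c_table; infer_instance

-- ===== CLAIM (what is proved, stated in full; the proofs are below) =====
def Claim_equal_build_c_table : Prop := ∀ (bwt : String), Dom_build_c_table bwt → Spec_build_c_table bwt (build_c_table bwt)

-- ===== LEMMAS AND PROOFS =====

-- sorted dedup (first of each run), used only to state the two fold lemmas
def sdedupF : Nat → List Char → List Char
  | _, [] => []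
  | 0, _ :: _ => []
  | n + 1, c :: l => c :: sdedupF n (l.filter (fun x => x ≠ c))

def sdedup (l : List Char) : List Char := sdedupF l.length l

theorem sdedupF_mono : ∀ (n m : Nat) (l : List Char), l.length ≤ n → l.length ≤ m →
    sdedupF n l = sdedupF m l := by
  intro n
  induction n with
  | zero =>
    intro m l hn _
    have : l = [] := List.eq_nil_of_length_eq_zero (Nat.le_zero.mp hn)
    subst this; cases m <;> rfl
  | succ n ih =>
    intro m l hn hm
    cases l with
    | nil => cases m <;> rfl
    | cons c t =>
      cases m with
      | zero => simp at hm
      | succ m =>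
        simp only [sdedupF]
        congr 1
        exact ih m _ ((List.length_filter_le _ _).trans (Nat.succ_le_succ_iff.mp hn))
          ((List.length_filter_le _ _).trans (Nat.succ_le_succ_iff.mp hm))

theorem sdedup_cons (c : Char) (l : List Char) :
    sdedup (c :: l) = c :: sdedup (l.filter (fun x => x ≠ c)) := by
  simp only [sdedup, List.length_cons, sdedupF]
  congr 1
  exact sdedupF_mono _ _ _ (List.length_filter_le _ _) (le_refl _)

theorem mem_sdedupF : ∀ (n : Nat) (l : List Char) (x : Char), l.length ≤ n →
    (x ∈ sdedupF n l ↔ x ∈ l) := by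
  intro n
  induction n with
  | zero =>
    intro l x hn
    have : l = [] := List.eq_nil_of_length_eq_zero (Nat.le_zero.mp hn)
    subst this; rfl
  | succ n ih =>
    intro l x hn
    cases l with
    | nil => rfl
    | cons c t =>
      simp only [sdedupF, List.mem_cons,
        ih _ x ((List.length_filter_le _ _).trans (Nat.succ_le_succ_iff.mp hn)),
        List.mem_filter, decide_eq_true_eq]
      by_cases hx : x = c <;> simp [hx]

theorem mem_sdedup {x : Char} {l : List Char} : x ∈ sdedup l ↔ x ∈ l :=
  mem_sdedupF _ _ _ (le_refl _)

theorem sdedupF_pairwise_lt : ∀ (n : Nat) (l : List Char), l.length ≤ n →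
    l.Pairwise (· ≤ ·) → (sdedupF n l).Pairwise (· < ·) := by
  intro n
  induction n with
  | zero =>
    intro l hn _
    have : l = [] := List.eq_nil_of_length_eq_zero (Nat.le_zero.mp hn)
    subst this; simp [sdedupF]
  | succ n ih =>
    intro l hn hp
    cases l with
    | nil => simp [sdedupF]
    | cons c t =>
      rw [List.pairwise_cons] at hp
      have hlen : (t.filter (fun x => x ≠ c)).length ≤ n :=
        (List.length_filter_le _ _).trans (Nat.succ_le_succ_iff.mp hn)
      refine List.pairwise_cons.mpr ⟨?_, ih _ hlen (hp.2.filter _)⟩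
      intro b hb
      have hb' := (mem_sdedupF n _ b hlen).mp hb
      rw [List.mem_filter, decide_eq_true_eq] at hb'
      exact lt_of_le_of_ne (hp.1 b hb'.1) (Ne.symm hb'.2)

theorem sdedup_pairwise_lt {l : List Char} (h : l.Pairwise (· ≤ ·)) :
    (sdedup l).Pairwise (· < ·) :=
  sdedupF_pairwise_lt _ _ (le_refl _) h

theorem countP_split (s : List Char) (p q : Char → Bool) (h : ∀ x ∈ s, ¬(p x = true ∧ q x = true)) :
    s.countP (fun x => p x || q x) = s.countP p + s.countP q := by
  induction s with
  | nil => simp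
  | cons a s ih =>
    have ha := h a (List.mem_cons_self)
    have ih' := ih (fun x hx => h x (List.mem_cons_of_mem _ hx))
    by_cases hp : p a = true
    · by_cases hq : q a = true
      · exact absurd ⟨hp, hq⟩ ha
      · simp [hp, hq, ih']; omega
    · by_cases hq : q a = true
      · simp [hp, hq, ih']; omega
      · simp [hp, hq, ih']

-- appending one fresh key
theorem items_insert_fresh (d : PySem.Dict Char Int) (k : Char) (v : Int)
    (h : d.contains k = false) : (d.insert k v).items = d.items ++ [(k, v)] := by
  have := PySem.Dict.items_foldl_insert_fresh (l := [k]) (k := fun x => x) (v := fun _ => v)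
    (d := d) (by simpa using h) (by simp)
  simpa using this

-- A's cumulative loop over a strictly sorted list of all distinct chars of s
theorem foldA (s : List Char) :
    ∀ (l : List Char) (d : PySem.Dict Char Int) (t : Int),
    l.Pairwise (· < ·) →
    (∀ c ∈ l, d.contains c = false) →
    (∀ x ∈ s, x ∈ l ∨ ∀ c ∈ l, x < c) →
    t = (s.countP (fun x => decide (∀ c ∈ l, x < c)) : Int) →
    ((l.foldl (fun (st : PySem.Dict Char Int × Int) c =>
        (st.1.insert c st.2, st.2 + ((PySem.Dict.counter s).getD c 0))) (d, t)).1).items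
      = d.items ++ l.map (fun c => (c, (s.countP (fun x => decide (x < c)) : Int))) := by
  intro l
  induction l with
  | nil => intro d t _ _ _ _; simp
  | cons c r ih =>
    intro d t hp hfresh hcov ht
    rw [List.pairwise_cons] at hp
    -- value written for c is the count of smaller characters
    have hval : t = (s.countP (fun x => decide (x < c)) : Int) := by
      rw [ht]
      have : s.countP (fun x => decide (∀ c' ∈ c :: r, x < c'))
          = s.countP (fun x => decide (x < c)) := by
        refine List.countP_congr ?_
        intro x _
        simp only [decide_eq_true_eq]
        constructor
        · intro h; exact h c (List.mem_cons_self)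
        · intro h y hy
          rcases List.mem_cons.mp hy with rfl | hy'
          · exact h
          · exact lt_trans h (hp.1 y hy')
      rw [this]
    have hcnt : (PySem.Dict.counter s).getD c 0 = (s.count c : Int) := PySem.Dict.getD_counter ..
    have hstep : s.countP (fun x => decide (∀ c' ∈ r, x < c'))
        = s.countP (fun x => decide (∀ c' ∈ c :: r, x < c')) + s.count c := by
      rw [List.count_eq_countP]
      rw [← countP_split s _ _ ?_]
      · refine List.countP_congr ?_
        intro x hx
        simp only [Bool.or_eq_true, decide_eq_true_eq, beq_iff_eq]
        constructor
        · intro h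
          by_cases hxc : x = c
          · exact Or.inr hxc
          · rcases hcov x hx with hxl | hlt
            · rcases List.mem_cons.mp hxl with rfl | hxr
              · exact absurd rfl hxc
              · exact absurd (h x hxr) (lt_irrefl x)
            · exact Or.inl hlt
        · intro h y hy
          rcases h with h | rfl
          · exact h y (List.mem_cons_of_mem _ hy)
          · exact hp.1 y hy
      · intro x _
        rintro ⟨h1, h2⟩
        simp only [decide_eq_true_eq] at h1
        simp only [beq_iff_eq] at h2
        subst h2
        exact lt_irrefl x (h1 x (List.mem_cons_self))
    simp only [List.foldl_cons]
    rw [ih (d.insert c t) (t + (PySem.Dict.counter s).getD c 0) hp.2 ?_ ?_ ?_]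
    · rw [items_insert_fresh d c t (hfresh c (List.mem_cons_self)), hval]
      simp [List.append_assoc]
    · intro x hx
      rw [PySem.Dict.contains_insert]
      have : x ≠ c := fun h => absurd (h ▸ hp.1 x hx) (lt_irrefl x)
      simp [this, hfresh x (List.mem_cons_of_mem _ hx)]
    · intro x hx
      rcases hcov x hx with hxl | hlt
      · rcases List.mem_cons.mp hxl with rfl | hxr
        · exact Or.inr (fun y hy => hp.1 y hy)
        · exact Or.inl hxr
      · exact Or.inr (fun y hy => hlt y (List.mem_cons_of_mem _ hy))
    · rw [ht, hcnt, hstep]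
      push_cast
      ring

-- B's first-occurrence loop over the sorted stream
theorem foldB :
    ∀ (f : List Char) (d : PySem.Dict Char Int) (i : Int),
    f.Pairwise (· ≤ ·) →
    (∀ x ∈ f, d.contains x = true → ∀ y ∈ f, x ≤ y) →
    ((PySem.List.enumerate f i).foldl
        (fun (d : PySem.Dict Char Int) p => if d.contains p.2 then d else d.insert p.2 p.1) d).items
      = d.items ++ (sdedup (f.filter (fun x => !d.contains x))).map
          (fun c => (c, i + (f.countP (fun x => decide (x < c)) : Int))) := by
  intro f
  induction f with
  | nil => intro d i _ _; simp [sdedup, sdedupF, PySem.List.enumerate]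
  | cons c r ih =>
    intro d i hp hd
    rw [List.pairwise_cons] at hp
    rw [PySem.List.enumerate_cons, List.foldl_cons]
    by_cases hc : d.contains c = true
    · -- c already seen: skipped, and filtered out of the target
      simp only [hc, if_true]
      rw [ih d (i + 1) hp.2 ?_]
      · congr 1
        have hflt : (c :: r).filter (fun x => !d.contains x) = r.filter (fun x => !d.contains x) := by
          simp [hc]
        rw [hflt]
        refine List.map_congr_left ?_
        intro b hb
        have hb1 : b ∈ r.filter (fun x => !d.contains x) := mem_sdedup.mp hb
        rw [List.mem_filter] at hb1
        have hbc : b ≠ c := by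
          intro h
          rw [h] at hb1
          simp [hc] at hb1
        have hcb : c < b :=
          lt_of_le_of_ne (hd c (List.mem_cons_self) hc b (List.mem_cons_of_mem _ hb1.1)) (Ne.symm hbc)
        simp only [List.countP_cons, decide_eq_true_eq, hcb, if_pos, Prod.mk.injEq]
        refine ⟨trivial, ?_⟩
        push_cast
        ring
      · intro x hx hcx y hy
        exact hd x (List.mem_cons_of_mem _ hx) hcx y (List.mem_cons_of_mem _ hy)
    · -- first occurrence of c: inserted with index i
      simp only [hc, if_false, Bool.false_eq_true]
      rw [ih (d.insert c i) (i + 1) hp.2 ?_]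
      · rw [items_insert_fresh d c i (Bool.eq_false_iff.mpr hc)]
        have hflt : (c :: r).filter (fun x => !d.contains x)
            = c :: r.filter (fun x => !d.contains x) := by
          simp [hc]
        rw [hflt, sdedup_cons]
        have hflt2 : (r.filter (fun x => !d.contains x)).filter (fun x => x ≠ c)
            = r.filter (fun x => !(d.insert c i).contains x) := by
          rw [List.filter_filter]
          refine List.filter_congr ?_
          intro x _
          rw [PySem.Dict.contains_insert]
          by_cases hxc : x = c <;> simp [hxc]
        rw [← hflt2]
        simp only [List.map_cons]
        have hzero : (c :: r).countP (fun x => decide (x < c)) = 0 := by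
          rw [List.countP_eq_zero]
          intro x hx
          rcases List.mem_cons.mp hx with rfl | hx'
          · simp
          · simp only [decide_eq_true_eq]
            exact not_lt_of_ge (hp.1 x hx')
        rw [hzero, List.append_assoc, List.singleton_append]
        congr 1
        congr 1
        · norm_num
        refine List.map_congr_left ?_
        intro b hb
        have hb1 : b ∈ (r.filter (fun x => !d.contains x)).filter (fun x => x ≠ c) := mem_sdedup.mp hb
        rw [List.mem_filter] at hb1
        have hb2 := hb1.1
        rw [List.mem_filter] at hb2
        have hbc : b ≠ c := by simpa using hb1.2
        have hcb : c < b := lt_of_le_of_ne (hp.1 b hb2.1) (Ne.symm hbc)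
        simp only [List.countP_cons, decide_eq_true_eq, hcb, if_pos, Prod.mk.injEq]
        refine ⟨trivial, ?_⟩
        push_cast
        ring
      · intro x hx hcx y hy
        rw [PySem.Dict.contains_insert] at hcx
        by_cases hxc : x = c
        · subst hxc
          exact hp.1 y hy
        · have hcx' : d.contains x = true := by
            rcases Bool.or_eq_true_iff.mp hcx with h | h
            · exact absurd (by simpa using h) hxc
            · exact h
          exact hd x (List.mem_cons_of_mem _ hx) hcx' y (List.mem_cons_of_mem _ hy)

theorem sdedup_sorted (s : List Char) :
    PySem.List.sorted (PySem.Set.ofList s) (fun c => c) false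
      = sdedup (PySem.List.sorted s (fun c => c) false) := by
  have hle : (PySem.List.sorted s (fun c => c) false).Pairwise (· ≤ ·) :=
    PySem.List.sorted_pairwise s (fun c => c)
  have hlt := sdedup_pairwise_lt hle
  refine PySem.List.sorted_eq_of_perm_of_pairwise_lt _ _ _ ?_ hlt
  refine (List.perm_ext_iff_of_nodup (hlt.imp ne_of_lt) (PySem.Set.nodup_ofList s)).mpr ?_
  intro x
  rw [mem_sdedup, PySem.List.mem_sorted, PySem.Set.mem_ofList]

-- ===== VERDICT (by name: the statement is the Claim_ definition above) =====
theorem build_c_table_spec : Claim_equal_build_c_table := by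
  intro bwt _
  unfold Spec_build_c_table build_c_table build_c_table_alt
  simp only
  set s := bwt.toList with hs
  have hcounter : s.foldl (fun d c => d.insert c (d.getD c 0 + 1)) PySem.Dict.empty
      = PySem.Dict.counter s := PySem.Dict.foldl_insert_getD_add_one_eq_counter ..
  rw [hcounter, PySem.Dict.keys_counter]
  have hA := foldA s (PySem.List.sorted (PySem.Set.ofList s) (fun c => c) false)
      PySem.Dict.empty 0
      (PySem.List.sorted_ofList_pairwise_lt s)
      (fun c _ => PySem.Dict.contains_empty ..)
      (fun x hx => Or.inl (by rw [PySem.List.mem_sorted, PySem.Set.mem_ofList]; exact hx))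
      ?_
  · rw [hA]
    have hB := foldB (PySem.List.sorted s (fun c => c) false) PySem.Dict.empty 0
        (PySem.List.sorted_pairwise s (fun c => c))
        (fun x _ hcx => absurd (hcx ▸ PySem.Dict.contains_empty (κ := Char) (ν := Int) x) (by simp))
    rw [hB]
    have hfilter : (PySem.List.sorted s (fun c => c) false).filter
        (fun x => !(PySem.Dict.empty : PySem.Dict Char Int).contains x)
        = PySem.List.sorted s (fun c => c) false := by
      refine List.filter_eq_self.mpr ?_
      intro x _
      simp [PySem.Dict.contains_empty]
    rw [hfilter, ← sdedup_sorted]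
    have hie : (PySem.Dict.empty : PySem.Dict Char Int).items = [] := rfl
    rw [hie]
    simp only [List.nil_append]
    congr 1
    refine List.map_congr_left ?_
    intro b _
    have hperm : (PySem.List.sorted s (fun c => c) false).Perm s := PySem.List.sorted_perm ..
    rw [hperm.countP_eq]
    norm_num
  · symm
    norm_cast
    rw [List.countP_eq_zero]
    intro x hx
    simp only [decide_eq_true_eq]
    intro h
    exact absurd (h x (by rw [PySem.List.mem_sorted, PySem.Set.mem_ofList]; exact hx)) (lt_irrefl x)
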